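-- pv_equiv track=rewrite | github.com/jejjohnson/oceanbench | oceanbench/_src/datasets/utils.py | update_dict_keys
-- ===== SOURCE A (Python) =====
-- from typing import List, Dict, Tuple, NamedTuple, Optional, Iterable
-- from collections import OrderedDict
--
-- def update_dict_keys(source: Dict[str, int], new: Dict[str, int], default: bool=True) -> Dict[str, int]:
--     """Updates new dictionary with keys from source
--
--     Args:
--         source (Dict[str, int]): the source dictionary
--         new (Dict[str, int]): the new dictionary
--         default (bool): initialize values of new dict with values of old dict
--             (detault=True)
--
--     Returns:
--         update (Dict[str, int]): the updated dictionary
--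
--     Examples:
--         >>> source = {"x": 1, "y": 100}
--         >>> new = {"x": 100}
--         >>> update = update_dict_keys(source, new)
--         >>> update
--         {"x": 100, "y": 1}
--     """
-- #     if default:
-- #         update = OrderedDict()
--
-- #         for ikey in source.keys():
-- #             if ikey not in new.keys():
-- #                 update[ikey] = source[ikey]
-- #             else:
-- #                 update[ikey] = new[ikey]
--
-- #         # update = {f"{ikey}": source[ikey] for ikey in source.keys() if ikey not in list(new.keys())}
-- #     else:
--     update = OrderedDict()
--
--     for ikey in source.keys():
--         if ikey not in new.keys():
--             if default:
--                 update[ikey] = source[ikey]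
--             else:
--                 update[ikey] = 1
--         else:
--             update[ikey] = new[ikey]
--
--         # update = {f"{ikey}": 1 for ikey in source.keys() if ikey not in list(new.keys())}
--
--     # update = {**new, **update}
--
--     msg = f"Dict keys not same...: \n{source.keys()}\n{update.keys()}"
--
--     assert source.keys() == update.keys(), msg
--
--     return update
-- ===== SOURCE B (Python) =====
-- from collections import OrderedDict
--
-- def update_dict_keys(source, new, default=True):
--     """Build-then-overlay: base table from source, then overwrite with new's values."""
--     base = OrderedDict((k, (source[k] if default else 1)) for k in source.keys())
--     for k, v in new.items():
--         if k in source: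
--             base[k] = v
--     return base
-- ===== Notes on version B (the rewrite author's own statement) =====
-- stated objective: alternative
-- what changed: B first builds the whole base table (source value or 1) in one pass over source, then overlays new's values in a second pass over new.items(), instead of A's single pass over source that branches on membership in new for every key.
import Mathlib
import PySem

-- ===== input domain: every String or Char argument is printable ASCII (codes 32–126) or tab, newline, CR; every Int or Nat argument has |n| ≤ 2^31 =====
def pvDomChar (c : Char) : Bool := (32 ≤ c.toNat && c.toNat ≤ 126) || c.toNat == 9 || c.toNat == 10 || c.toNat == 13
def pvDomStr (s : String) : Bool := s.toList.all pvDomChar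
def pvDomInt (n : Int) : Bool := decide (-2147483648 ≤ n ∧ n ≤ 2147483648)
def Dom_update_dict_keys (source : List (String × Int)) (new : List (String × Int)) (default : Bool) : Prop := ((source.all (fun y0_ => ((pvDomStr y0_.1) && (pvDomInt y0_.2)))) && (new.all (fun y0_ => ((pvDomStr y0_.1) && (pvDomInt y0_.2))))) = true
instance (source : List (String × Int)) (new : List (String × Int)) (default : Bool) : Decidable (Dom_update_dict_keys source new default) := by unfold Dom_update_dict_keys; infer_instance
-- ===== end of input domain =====

-- B changes the decomposition: build the whole base table from source first, then overlay new's values (A branches per source key); return-value equivalence.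

-- ===== PORT A =====
-- single pass over source.keys(), branching per key on membership in new
def update_dict_keys (source : List (String × Int)) (new : List (String × Int)) (default : Bool) : List (String × Int) :=
  let src := PySem.Dict.ofList source
  let nw := PySem.Dict.ofList new
  let update := src.keys.foldl (fun u ikey =>
    if nw.contains ikey = false then
      if default then u.insert ikey (src.getD ikey 0) else u.insert ikey 1
    else u.insert ikey (nw.getD ikey 0)) PySem.Dict.empty
  -- the assert 'source.keys() == update.keys()' always holds (update has exactly source's keys); total
  update.items

-- ===== PORT B =====
-- build the base table in one pass over source, then overlay new.items()
def update_dict_keys_alt (source : List (String × Int)) (new : List (String × Int)) (default : Bool) : List (String × Int) :=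
  let src := PySem.Dict.ofList source
  let base := src.keys.foldl (fun u k =>
    u.insert k (if default then src.getD k 0 else 1)) PySem.Dict.empty
  let out := (PySem.Dict.ofList new).items.foldl (fun u p =>
    if src.contains p.1 then u.insert p.1 p.2 else u) base
  out.items

-- ===== PRECONDITION & SPEC =====
def Spec_update_dict_keys (source : List (String × Int)) (new : List (String × Int)) (default : Bool) (out : List (String × Int)) : Prop := out = update_dict_keys_alt source new default
instance (source : List (String × Int)) (new : List (String × Int)) (default : Bool) (out : List (String × Int)) : Decidable (Spec_update_dict_keys source new default out) := by unfold Spec_update_dict_keys; infer_instance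

-- ===== CLAIM (what is proved, stated in full; the proofs are below) =====
def Claim_equal_update_dict_keys : Prop := ∀ (source : List (String × Int)) (new : List (String × Int)) (default : Bool), Dom_update_dict_keys source new default → Spec_update_dict_keys source new default (update_dict_keys source new default)

-- ===== LEMMAS AND PROOFS =====

-- the value B's overlay loop leaves at key k (g = value before the overlay)
def pvOv (ks : List String) : List (String × Int) → (String → Int) → String → Int
  | [], g, k => g k
  | p :: ps, g, k => pvOv ks ps (fun j => if p.1 ∈ ks ∧ j = p.1 then p.2 else g j) k

-- B's overlay fold on a dict of shape ks.map (k, g k) keeps that shape, with values pvOv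
theorem pv_overlay_items (ps : List (String × Int)) (ks : List String) (g : String → Int) :
    (ps.foldl (fun u p => if p.1 ∈ ks then u.insert p.1 p.2 else u)
        (PySem.Dict.mk (ks.map (fun k => (k, g k))))).items
      = ks.map (fun k => (k, pvOv ks ps g k)) := by
  induction ps generalizing g with
  | nil => simp [pvOv]
  | cons p ps ih =>
    simp only [List.foldl_cons, pvOv]
    by_cases hmem : p.1 ∈ ks
    · rw [if_pos hmem]
      have hc : (PySem.Dict.mk (ks.map (fun k => (k, g k)))).contains p.1 = true := by
        simp [PySem.Dict.contains_mk]
        exact hmem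
      have hins : (PySem.Dict.mk (ks.map (fun k => (k, g k)))).insert p.1 p.2
          = PySem.Dict.mk (ks.map (fun k => (k, if p.1 ∈ ks ∧ k = p.1 then p.2 else g k))) := by
        apply PySem.Dict.ext
        rw [PySem.Dict.items_insert, hc]
        simp only [List.map_map, if_true]
        apply List.map_congr_left
        intro k hk
        by_cases h : k = p.1 <;> simp [h, hmem]
      rw [hins]
      exact ih _
    · rw [if_neg hmem]
      have hg : (fun j => if p.1 ∈ ks ∧ j = p.1 then p.2 else g j) = g := by
        funext j; simp [hmem]
      rw [hg]
      exact ih g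

-- a key never overlaid keeps its base value
theorem pvOv_not_mem (ks : List String) (ps : List (String × Int)) (g : String → Int) (k : String)
    (h : k ∉ ps.map (·.1)) : pvOv ks ps g k = g k := by
  induction ps generalizing g with
  | nil => rfl
  | cons p ps ih =>
    simp only [List.map_cons, List.mem_cons, not_or] at h
    simp only [pvOv]
    rw [ih _ h.2]
    simp [h.1]

-- a key of ks present (uniquely) in ps gets ps's value
theorem pvOv_mem (ks : List String) (ps : List (String × Int)) (g : String → Int) (k : String) (v : Int)
    (hks : k ∈ ks) (hnd : (ps.map (·.1)).Nodup) (hmem : (k, v) ∈ ps) : pvOv ks ps g k = v := by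
  induction ps generalizing g with
  | nil => cases hmem
  | cons p ps ih =>
    simp only [List.map_cons, List.nodup_cons] at hnd
    simp only [pvOv]
    rcases List.mem_cons.mp hmem with h | h
    · have hp1 : p.1 = k := by rw [← h]
      rw [pvOv_not_mem _ _ _ _ (hp1 ▸ hnd.1)]
      simp [← h, hks]
    · exact ih _ hnd.2 h

theorem update_dict_keys_eq (source new : List (String × Int)) (default : Bool) :
    update_dict_keys source new default = update_dict_keys_alt source new default := by
  unfold update_dict_keys update_dict_keys_alt
  dsimp only
  set src := PySem.Dict.ofList source with hsrc
  set nw := PySem.Dict.ofList new with hnw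
  set ks := src.keys with hks
  have hndks : ks.Nodup := PySem.Dict.nodup_keys_ofList source
  have hndnw : nw.keys.Nodup := PySem.Dict.nodup_keys_ofList new
  -- A's fold is a fresh-key insert loop with a pure value function
  have hA : (ks.foldl (fun u ikey =>
      if nw.contains ikey = false then
        if default then u.insert ikey (src.getD ikey 0) else u.insert ikey 1
      else u.insert ikey (nw.getD ikey 0)) PySem.Dict.empty).items
      = ks.map (fun k => (k, if nw.contains k
          then nw.getD k 0 else (if default then src.getD k 0 else 1))) := by
    have hfun : (fun (u : PySem.Dict String Int) ikey =>
        if nw.contains ikey = false then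
          if default then u.insert ikey (src.getD ikey 0) else u.insert ikey 1
        else u.insert ikey (nw.getD ikey 0))
        = fun u ikey => u.insert ikey (if nw.contains ikey
            then nw.getD ikey 0 else (if default then src.getD ikey 0 else 1)) := by
      funext u ikey
      cases h : nw.contains ikey <;> cases default <;> simp [h]
    rw [hfun,
      PySem.Dict.items_foldl_insert_fresh ks (fun a => a) _ PySem.Dict.empty
        (fun a _ => PySem.Dict.contains_empty a) (by simpa using hndks)]
    simp [PySem.Dict.empty]
  -- B's base fold
  have hB : (ks.foldl (fun u k =>
      u.insert k (if default then src.getD k 0 else 1)) PySem.Dict.empty)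
      = PySem.Dict.mk (ks.map (fun k => (k, if default then src.getD k 0 else 1))) := by
    apply PySem.Dict.ext
    rw [PySem.Dict.items_foldl_insert_fresh ks (fun a => a) _ PySem.Dict.empty
      (fun a _ => PySem.Dict.contains_empty a) (by simpa using hndks)]
    simp [PySem.Dict.empty]
  rw [hA, hB]
  -- B's overlay condition is membership in ks
  have hcond : (fun (u : PySem.Dict String Int) (p : String × Int) =>
      if src.contains p.1 then u.insert p.1 p.2 else u)
      = fun u p => if p.1 ∈ ks then u.insert p.1 p.2 else u := by
    funext u p
    rw [PySem.Dict.contains_eq_decide_mem_keys]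
    simp [hks]
  rw [hcond, pv_overlay_items]
  -- pointwise equality of values over ks
  apply List.map_congr_left
  intro k hk
  cases h : nw.contains k with
  | true =>
    have hs : (nw.get? k).isSome = true := (PySem.Dict.contains_eq_isSome_get? nw k) ▸ h
    rcases Option.isSome_iff_exists.1 hs with ⟨v, hv⟩
    rw [PySem.Dict.getD_of_get?_eq_some nw 0 hv,
      pvOv_mem ks nw.items _ k v hk (by simpa [PySem.Dict.keys] using hndnw)
        (PySem.Dict.mem_items_of_get?_eq_some nw hv)]
    simp
  | false =>
    have hk' : k ∉ nw.items.map (·.1) := by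
      intro hmem'
      have hct : nw.contains k = true :=
        (PySem.Dict.contains_iff_mem_keys nw k).2 (by simpa [PySem.Dict.keys] using hmem')
      simp [h] at hct
    rw [pvOv_not_mem ks nw.items _ k hk']
    simp

-- ===== VERDICT (by name: the statement is the Claim_ definition above) =====
theorem update_dict_keys_spec : Claim_equal_update_dict_keys := by
  intro source new default _
  exact update_dict_keys_eq source new default
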